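-- pv_equiv track=rewrite | github.com/bvschaik/advent-of-code | 2019/day06.py | path_to_com
-- ===== SOURCE A (Python) =====
-- def path_to_com(start, parents):
--     obj_parents = []
--     obj = start
--     while obj != 'COM':
--         obj_parents.append(obj)
--         obj = parents[obj]
--     obj_parents.reverse()
--     return obj_parents
-- ===== SOURCE B (Python) =====
-- def nth_parent(start, i, parents):
--     obj = start
--     for _ in range(i):
--         obj = parents[obj]
--     return obj
--
--
-- def path_to_com(start, parents):
--     # pass 1: length of the chain from start down to (exclusive) COM
--     n = 0
--     obj = start
--     while obj != 'COM':
--         n += 1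
--         obj = parents[obj]
--     # pass 2: element j of the answer is the (n-1-j)-th ancestor of start
--     return [nth_parent(start, i, parents) for i in range(n - 1, -1, -1)]
-- ===== Notes on version B (the rewrite author's own statement) =====
-- stated objective: alternative
-- what changed: Replaces the single append-then-reverse walk by a staged two-pass construction: first pass counts the chain length n, second pass emits the answer positionally as the i-th ancestor of start for i = n-1..0, with no accumulator list and no reverse.
import Mathlib
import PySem

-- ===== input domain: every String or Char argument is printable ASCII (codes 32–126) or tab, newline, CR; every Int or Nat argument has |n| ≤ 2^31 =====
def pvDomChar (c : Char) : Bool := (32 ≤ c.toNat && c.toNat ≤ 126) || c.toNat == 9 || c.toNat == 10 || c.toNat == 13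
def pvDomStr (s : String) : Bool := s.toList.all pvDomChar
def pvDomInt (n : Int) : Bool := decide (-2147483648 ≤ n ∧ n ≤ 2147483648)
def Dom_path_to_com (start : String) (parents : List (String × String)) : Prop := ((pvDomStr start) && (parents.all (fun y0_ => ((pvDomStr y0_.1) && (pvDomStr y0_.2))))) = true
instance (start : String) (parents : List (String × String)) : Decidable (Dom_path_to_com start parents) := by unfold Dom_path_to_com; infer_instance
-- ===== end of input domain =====

-- B replaces the append-then-reverse walk by a two-pass construction: count the chain length n,
-- then emit element j directly as the (n-1-j)-th ancestor of start (objective: alternative; not faster).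

-- ===== PORT A =====
-- fuel-guarded transliteration of A's while loop: append obj, step to parents[obj], reverse at the end.
-- fuel (parents.length + 1) suffices on every input admitted by Pre_; missing key (Python KeyError) is outside Pre_.
def pathLoopA (parents : PySem.Dict String String) : Nat → String → List String → List String
  | 0, _, acc => acc.reverse
  | fuel + 1, obj, acc =>
    if obj == "COM" then acc.reverse
    else
      match parents.get? obj with
      | some p => pathLoopA parents fuel p (acc ++ [obj])
      | none => acc.reverse   -- KeyError in Python: excluded by Pre_

def path_to_com (start : String) (parents : List (String × String)) : List String :=
  pathLoopA (PySem.Dict.ofList parents) (parents.length + 1) start []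

-- ===== PORT B =====
-- Source B's helper nth_parent: walk the parent pointer i times (for _ in range(i)).
def pstepB (d : PySem.Dict String String) (obj : String) : String :=
  match d.get? obj with
  | some p => p
  | none => obj   -- KeyError in Python: excluded by Pre_

def nth_parent (d : PySem.Dict String String) (start : String) (i : Int) : String :=
  (PySem.List.pyRange 0 i 1).foldl (fun obj _ => pstepB d obj) start

-- Source B's first pass: fuel-guarded count of the while loop's iterations.
def countB (d : PySem.Dict String String) : Nat → String → Nat
  | 0, _ => 0
  | fuel + 1, obj =>
    if obj == "COM" then 0
    else
      match d.get? obj with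
      | some p => countB d fuel p + 1
      | none => 0   -- KeyError in Python: excluded by Pre_

def path_to_com_alt (start : String) (parents : List (String × String)) : List String :=
  let d := PySem.Dict.ofList parents
  let n : Int := (countB d (parents.length + 1) start : Int)
  (PySem.List.pyRange (n - 1) (-1) (-1)).map (fun i => nth_parent d start i)

-- ===== PRECONDITION & SPEC =====
-- iterP d k s = the k-th iterated parent of s (none once a lookup is missing)
def iterP (d : PySem.Dict String String) : Nat → String → Option String
  | 0, s => some s
  | n + 1, s =>
    match d.get? s with
    | some p => iterP d n p
    | none => none

-- Pre_: "COM" occurs among the iterated parents of start (within parents.length steps, which by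
-- pigeonhole covers every terminating chain); otherwise Python A raises KeyError or loops forever
-- on a cycle, and B does the same, so those inputs are excluded.
def Pre_path_to_com (start : String) (parents : List (String × String)) : Prop :=
  ∃ k ≤ parents.length, iterP (PySem.Dict.ofList parents) k start = some "COM"

instance (start : String) (parents : List (String × String)) : Decidable (Pre_path_to_com start parents) := by
  unfold Pre_path_to_com; infer_instance

def pvWitness_path_to_com : String × (List (String × String)) :=
  ("D", [("B", "COM"), ("C", "B"), ("D", "C")])

def Spec_path_to_com (start : String) (parents : List (String × String)) (out : List String) : Prop := out = path_to_com_alt start parents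
instance (start : String) (parents : List (String × String)) (out : List String) : Decidable (Spec_path_to_com start parents out) := by unfold Spec_path_to_com; infer_instance

-- ===== CLAIM (what is proved, stated in full; the proofs are below) =====
def Claim_equal_path_to_com : Prop := ∀ (start : String) (parents : List (String × String)), Dom_path_to_com start parents → Pre_path_to_com start parents → Spec_path_to_com start parents (path_to_com start parents)

-- ===== LEMMAS AND PROOFS =====

-- iterS d i s = i-fold application of the total parent step (proof-side view of nth_parent)
def iterS (d : PySem.Dict String String) : Nat → String → String
  | 0, s => s
  | i + 1, s => iterS d i (pstepB d s)

theorem foldl_const_step (d : PySem.Dict String String) (l : List Int) (s : String) :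
    l.foldl (fun obj _ => pstepB d obj) s = iterS d l.length s := by
  induction l generalizing s with
  | nil => rfl
  | cons x xs ih => simp [List.foldl, ih, iterS]

theorem nth_parent_natCast (d : PySem.Dict String String) (start : String) (i : Nat) :
    nth_parent d start (i : Int) = iterS d i start := by
  rw [nth_parent, foldl_const_step, PySem.List.length_pyRange_one]
  norm_num

theorem iterS_succ_of_get (d : PySem.Dict String String) {obj p : String}
    (h : d.get? obj = some p) (i : Nat) : iterS d (i + 1) obj = iterS d i p := by
  simp [iterS, pstepB, h]

-- A's loop computes the reverse of the first (countB …) iterated parents of obj, before acc.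
theorem pathLoopA_eq (d : PySem.Dict String String) (fuel : Nat) :
    ∀ (j : Nat) (obj : String) (acc : List String), j ≤ fuel → iterP d j obj = some "COM" →
    pathLoopA d fuel obj acc =
      ((List.range (countB d fuel obj)).map (fun i => iterS d i obj)).reverse ++ acc.reverse := by
  induction fuel with
  | zero => intro j obj acc hj _; simp [pathLoopA, countB]
  | succ f ih =>
    intro j obj acc hj hit
    simp only [pathLoopA, countB]
    by_cases hc : obj == "COM"
    · simp [hc]
    · simp only [hc, Bool.false_eq_true, if_false]
      cases j with
      | zero =>
        simp only [iterP, Option.some.injEq] at hit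
        exact absurd (by simp [hit]) hc
      | succ j' =>
        simp only [iterP] at hit
        cases hg : d.get? obj with
        | none => rw [hg] at hit; cases hit
        | some p =>
          rw [hg] at hit
          dsimp only
          rw [ih j' p (acc ++ [obj]) (Nat.succ_le_succ_iff.mp hj) hit]
          rw [List.range_succ_eq_map]
          simp only [List.map_cons, List.map_map, List.reverse_cons]
          have hmap : (List.range (countB d f p)).map ((fun i => iterS d i obj) ∘ Nat.succ)
              = (List.range (countB d f p)).map (fun i => iterS d i p) := by
            refine List.map_congr_left ?_
            intro i _
            exact iterS_succ_of_get d hg i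
          simp [iterS, hmap]

-- (searched: no such lemma in Mathlib/Batteries here) reversing List.range n is mapping k ↦ n-1-k
theorem range_reverse_map (n : Nat) :
    (List.range n).reverse = (List.range n).map (fun k => n - 1 - k) := by
  apply List.ext_getElem
  · simp
  · intro i h1 h2
    simp only [List.getElem_reverse, List.length_range, List.getElem_range, List.getElem_map]

-- B computes the same reversed-range map.
theorem path_to_com_alt_eq (start : String) (parents : List (String × String)) :
    path_to_com_alt start parents =
      ((List.range (countB (PySem.Dict.ofList parents) (parents.length + 1) start)).map
        (fun i => iterS (PySem.Dict.ofList parents) i start)).reverse := by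
  unfold path_to_com_alt
  dsimp only
  set d := PySem.Dict.ofList parents
  set n := countB d (parents.length + 1) start with hn
  rw [PySem.List.pyRange_neg_one]
  have hcap : (((n : Int) - 1) - (-1)).toNat = n := by omega
  rw [hcap, List.map_map, ← List.map_reverse, range_reverse_map, List.map_map]
  refine List.map_congr_left ?_
  intro k hk
  rw [List.mem_range] at hk
  have : ((n : Int) - 1 - (k : Int)) = ((n - 1 - k : Nat) : Int) := by omega
  simp only [Function.comp]
  rw [this, nth_parent_natCast]

-- ===== VERDICT (by name: the statement is the Claim_ definition above) =====
theorem path_to_com_spec : Claim_equal_path_to_com := by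
  intro start parents _ hpre
  unfold Spec_path_to_com path_to_com
  obtain ⟨k, hk, hit⟩ := hpre
  rw [pathLoopA_eq _ _ k _ _ (Nat.le_succ_of_le hk) hit, path_to_com_alt_eq]
  simp
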